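-- pv_equiv track=rewrite | github.com/AnishKumar-gesgts/Science-Fair-25_26 | Simulation Program.py | noerror_decoder
-- ===== SOURCE A (Python) =====
-- def noerror_decoder(Middle3Qubits):
--     finalcountsnoerror = {"0":0, "1":0}
--     for value, freq in Middle3Qubits.items():
--         if value.count("0") > 1:
--             majority = "0"
--         else:
--             majority = "1"
--         finalcountsnoerror[majority] += freq
--     return finalcountsnoerror
-- ===== SOURCE B (Python) =====
-- def noerror_decoder(Middle3Qubits):
--     def counts(pairs):
--         if not pairs:
--             return 0, 0
--         if len(pairs) == 1:
--             value, freq = pairs[0]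
--             return (freq, 0) if value.count("0") > 1 else (0, freq)
--         mid = len(pairs) // 2
--         z1, o1 = counts(pairs[:mid])
--         z2, o2 = counts(pairs[mid:])
--         return z1 + z2, o1 + o2
--     zeros, ones = counts(list(Middle3Qubits.items()))
--     return {"0": zeros, "1": ones}
-- ===== Notes on version B (the rewrite author's own statement) =====
-- stated objective: alternative
-- what changed: Replaces A's dict-mutating left-to-right loop by a divide-and-conquer recursion: the item list is split in half, each half yields a (zeros, ones) pair, pairs are merged by componentwise addition, and the result dict is built once at the end; correct because integer addition is associative and commutative.
import Mathlib
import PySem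

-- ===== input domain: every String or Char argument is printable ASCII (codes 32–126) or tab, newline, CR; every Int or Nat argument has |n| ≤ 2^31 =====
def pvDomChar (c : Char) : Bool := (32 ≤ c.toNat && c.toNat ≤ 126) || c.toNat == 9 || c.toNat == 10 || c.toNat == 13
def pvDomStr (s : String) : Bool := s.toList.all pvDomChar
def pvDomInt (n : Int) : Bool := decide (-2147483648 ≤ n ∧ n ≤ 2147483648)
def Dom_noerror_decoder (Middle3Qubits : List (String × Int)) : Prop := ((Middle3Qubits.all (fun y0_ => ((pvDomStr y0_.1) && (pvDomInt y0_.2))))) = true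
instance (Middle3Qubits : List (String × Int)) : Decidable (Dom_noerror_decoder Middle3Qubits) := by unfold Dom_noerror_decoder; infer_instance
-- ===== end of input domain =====

-- ===== PORT A =====
-- B replaces A's dict-mutating loop by a divide-and-conquer recursion merging (zeros, ones) pairs (objective: alternative).
def noerror_decoder (Middle3Qubits : List (String × Int)) : List (String × Int) :=
  (Middle3Qubits.foldl
    (fun d (p : String × Int) =>
      let majority : String := if PySem.Str.count p.1 "0" > 1 then "0" else "1"
      d.modify majority 0 (· + p.2))
    (PySem.Dict.ofList [("0", (0 : Int)), ("1", (0 : Int))])).items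

-- ===== PORT B =====
-- helper 'counts' of Source B: divide and conquer on the item list.
-- pairs[:mid] / pairs[mid:] with 0 <= mid <= len are exactly take/drop (exact on this in-range slice).
def altCounts : List (String × Int) → Int × Int
  | [] => (0, 0)
  | [p] => if PySem.Str.count p.1 "0" > 1 then (p.2, 0) else (0, p.2)
  | a :: b :: t =>
    let mid := (a :: b :: t).length / 2
    let zo1 := altCounts ((a :: b :: t).take mid)
    let zo2 := altCounts ((a :: b :: t).drop mid)
    (zo1.1 + zo2.1, zo1.2 + zo2.2)
termination_by l => l.length
decreasing_by
  · simp [List.length_take]; omega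
  · simp [List.length_drop]; omega

def noerror_decoder_alt (Middle3Qubits : List (String × Int)) : List (String × Int) :=
  let zo := altCounts Middle3Qubits
  [("0", zo.1), ("1", zo.2)]

-- ===== PRECONDITION & SPEC =====
def Spec_noerror_decoder (Middle3Qubits : List (String × Int)) (out : List (String × Int)) : Prop := out = noerror_decoder_alt Middle3Qubits
instance (Middle3Qubits : List (String × Int)) (out : List (String × Int)) : Decidable (Spec_noerror_decoder Middle3Qubits out) := by unfold Spec_noerror_decoder; infer_instance

-- ===== CLAIM (what is proved, stated in full; the proofs are below) =====
def Claim_equal_noerror_decoder : Prop := ∀ (Middle3Qubits : List (String × Int)), Dom_noerror_decoder Middle3Qubits → Spec_noerror_decoder Middle3Qubits (noerror_decoder Middle3Qubits)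

-- ===== LEMMAS AND PROOFS =====

-- the majority key A assigns to an entry
def pvKey (p : String × Int) : String := if PySem.Str.count p.1 "0" > 1 then "0" else "1"

-- Loop invariants: the running counts at keys "0" and "1".
theorem pv_getD_zero (l : List (String × Int)) (d : PySem.Dict String Int) :
    (l.foldl (fun d p => d.modify (pvKey p) 0 (· + p.2)) d).getD "0" 0
    = d.getD "0" 0 + ((l.filter (fun p => PySem.Str.count p.1 "0" > 1)).map (·.2)).sum := by
  induction l generalizing d with
  | nil => simp
  | cons p t ih =>
    simp only [List.foldl_cons, ih, PySem.Dict.getD_modify]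
    by_cases h : PySem.Str.count p.1 "0" > 1
    · have hk : pvKey p = "0" := by unfold pvKey; rw [if_pos h]
      have h' : 1 < PySem.Chars.count p.1.toList ['0'] := by simpa [PySem.Str.count] using h
      simp [hk, h']
      try ring
    · have hk : pvKey p = "1" := by unfold pvKey; rw [if_neg h]
      have h' : ¬ 1 < PySem.Chars.count p.1.toList ['0'] := by simpa [PySem.Str.count] using h
      have h2 : PySem.Chars.count p.1.toList ['0'] ≤ 1 := not_lt.mp h'
      simp [hk, h2]
      try ring

theorem pv_getD_one (l : List (String × Int)) (d : PySem.Dict String Int) :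
    (l.foldl (fun d p => d.modify (pvKey p) 0 (· + p.2)) d).getD "1" 0
    = d.getD "1" 0 + ((l.filter (fun p => ¬ PySem.Str.count p.1 "0" > 1)).map (·.2)).sum := by
  induction l generalizing d with
  | nil => simp
  | cons p t ih =>
    simp only [List.foldl_cons, ih, PySem.Dict.getD_modify]
    by_cases h : PySem.Str.count p.1 "0" > 1
    · have hk : pvKey p = "0" := by unfold pvKey; rw [if_pos h]
      have h' : 1 < PySem.Chars.count p.1.toList ['0'] := by simpa [PySem.Str.count] using h
      simp [hk, h']
      try ring
    · have hk : pvKey p = "1" := by unfold pvKey; rw [if_neg h]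
      have h' : ¬ 1 < PySem.Chars.count p.1.toList ['0'] := by simpa [PySem.Str.count] using h
      have h2 : PySem.Chars.count p.1.toList ['0'] ≤ 1 := not_lt.mp h'
      simp [hk, h2]
      try ring

-- the divide-and-conquer pair equals the two filtered sums
theorem altCounts_eq (l : List (String × Int)) :
    altCounts l = (((l.filter (fun p => PySem.Str.count p.1 "0" > 1)).map (·.2)).sum,
                   ((l.filter (fun p => ¬ PySem.Str.count p.1 "0" > 1)).map (·.2)).sum) := by
  have key : ∀ (n : Nat) (l : List (String × Int)), l.length ≤ n →
      altCounts l = (((l.filter (fun p => PySem.Str.count p.1 "0" > 1)).map (·.2)).sum,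
                     ((l.filter (fun p => ¬ PySem.Str.count p.1 "0" > 1)).map (·.2)).sum) := by
    intro n
    induction n with
    | zero =>
      intro l hl
      have : l = [] := List.eq_nil_of_length_eq_zero (by omega)
      subst this; simp [altCounts]
    | succ n ihn =>
      intro l hl
      match l with
      | [] => simp [altCounts]
      | [p] =>
        by_cases h : PySem.Str.count p.1 "0" > 1
        · have h' : 1 < PySem.Chars.count p.1.toList ['0'] := by simpa [PySem.Str.count] using h
          have h2 : ¬ PySem.Chars.count p.1.toList ['0'] ≤ 1 := not_le.mpr h'
          simp [altCounts, h', h2]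
        · have h' : ¬ 1 < PySem.Chars.count p.1.toList ['0'] := by simpa [PySem.Str.count] using h
          have h2 : PySem.Chars.count p.1.toList ['0'] ≤ 1 := not_lt.mp h'
          simp [altCounts, h', h2]
      | a :: b :: t =>
        have h1 : (List.take ((a :: b :: t).length / 2) (a :: b :: t)).length ≤ n := by
          simp at hl ⊢; omega
        have h2 : (List.drop ((a :: b :: t).length / 2) (a :: b :: t)).length ≤ n := by
          simp at hl ⊢; omega
        rw [show altCounts (a :: b :: t)
            = ((altCounts (List.take ((a :: b :: t).length / 2) (a :: b :: t))).1
                + (altCounts (List.drop ((a :: b :: t).length / 2) (a :: b :: t))).1,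
               (altCounts (List.take ((a :: b :: t).length / 2) (a :: b :: t))).2
                + (altCounts (List.drop ((a :: b :: t).length / 2) (a :: b :: t))).2)
            from by simp [altCounts]]
        rw [ihn _ h1, ihn _ h2]
        conv_rhs => rw [← List.take_append_drop ((a :: b :: t).length / 2) (a :: b :: t)]
        simp only [List.filter_append, List.map_append, List.sum_append]
  exact key l.length l le_rfl

-- The keys never change: every majority key is already present.
theorem pv_keys (l : List (String × Int)) :
    (l.foldl (fun d p => d.modify (pvKey p) 0 (· + p.2))
      (PySem.Dict.ofList [("0", (0 : Int)), ("1", (0 : Int))])).keys = ["0", "1"] := by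
  rw [PySem.Dict.keys_foldl_modify_key]
  have h0 : (PySem.Dict.ofList [("0", (0 : Int)), ("1", (0 : Int))]).keys = ["0", "1"] := by decide
  rw [h0, PySem.Set.update_eq_append_filter]
  have : (PySem.Set.ofList (l.map pvKey)).filter
      (fun y => !(PySem.Set.contains ["0", "1"] y)) = [] := by
    rw [List.filter_eq_nil_iff]
    intro a ha
    have hmem : a ∈ l.map pvKey := (PySem.Set.mem_ofList _ _).1 ha
    rcases List.mem_map.1 hmem with ⟨p, _, hp⟩
    have : a = "0" ∨ a = "1" := by
      unfold pvKey at hp; split at hp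
      · exact Or.inl hp.symm
      · exact Or.inr hp.symm
    rcases this with h | h <;> subst h <;> decide
  rw [this, List.append_nil]

theorem pv_nodup (l : List (String × Int)) :
    (l.foldl (fun d p => d.modify (pvKey p) 0 (· + p.2))
      (PySem.Dict.ofList [("0", (0 : Int)), ("1", (0 : Int))])).keys.Nodup := by
  rw [pv_keys]; decide

-- ===== VERDICT (by name: the statement is the Claim_ definition above) =====
theorem noerror_decoder_spec : Claim_equal_noerror_decoder := by
  intro l _
  show noerror_decoder l = noerror_decoder_alt l
  unfold noerror_decoder noerror_decoder_alt
  have hfold : (l.foldl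
      (fun d (p : String × Int) =>
        let majority : String := if PySem.Str.count p.1 "0" > 1 then "0" else "1"
        d.modify majority 0 (· + p.2))
      (PySem.Dict.ofList [("0", (0 : Int)), ("1", (0 : Int))]))
      = (l.foldl (fun d p => d.modify (pvKey p) 0 (· + p.2))
          (PySem.Dict.ofList [("0", (0 : Int)), ("1", (0 : Int))])) := rfl
  rw [hfold, PySem.Dict.items_eq_map_keys _ (pv_nodup l) 0, pv_keys,
     List.map_cons, List.map_cons, List.map_nil, pv_getD_zero, pv_getD_one]
  have g0 : (PySem.Dict.ofList [("0", (0 : Int)), ("1", (0 : Int))]).getD "0" 0 = 0 := by decide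
  have g1 : (PySem.Dict.ofList [("0", (0 : Int)), ("1", (0 : Int))]).getD "1" 0 = 0 := by decide
  rw [g0, g1]
  simp [altCounts_eq]
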